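-- pv_equiv track=rewrite | github.com/OhadAm7/FF3-code | prf_reconstruction.py | count_all_pentagons
-- ===== SOURCE A (Python) =====
-- from collections import defaultdict
--
-- def is_bad_cycle(cycle):
--     """
--     Checks if a triangles nodes have common messages
--     :param cycle: Cycle
--     :return: True if there are common messages, False if there aren't.
--     """
--     messages = []
--     for node in cycle:
--         for i in range(2):
--             if node[i] in messages:
--                 return True
--             messages.append(node[i])
--     return False
--
-- def normalize_cycle(cycle):
--     """
--     Normalizes a cycle such that the first node is the one with the smallest message
--     :param cycle: A cycle
--     :param n_bits: Half the bit size of the encryption domain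
--     :return: Normalized cycle
--     """
--     cycle_len = len(cycle)
--     nodes = list(enumerate(cycle))
--     node_val = lambda x: x[1]
--     min_node = min(nodes, key=node_val)[0]
--     normalized = [cycle[(min_node + i) % cycle_len] for i in range(cycle_len)]
--     return tuple(normalized)
--
-- def count_all_pentagons(graph):
--     """
--     Given a graph, finds all pentagons in it where the sum of labels is 0.
--     :param graph: outgoing: Dictionary from each node to its neighbors (outgoing)
--             incoming: Dictionary from each node to its neighbors (incoming)
--     :return: Number of pentagons, where each pentagon is a tuple of 5 nodes
--     """
--     outgoing = graph[0]
--     incoming = graph[1]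
--
--     pentagon_table = defaultdict(bool)
--
--     # Perform MITM to find pentagons of type (u, v, w, t, z)
--     for u in outgoing.keys():
--         in_path = defaultdict(list)
--
--         for z in incoming[u]:
--             for t in incoming[z]:
--                 in_path[t].append(z)
--
--         for v in outgoing[u]:
--             for w in outgoing[v]:
--                 for t in outgoing[w]:
--                     for z in in_path[t]:
--                         pentagon = (u, v, w, t, z)
--                         if not is_bad_cycle(pentagon):
--                             pentagon_table[normalize_cycle(pentagon)] = True
--
--     pentagon_count = 0
--     for pentagon in pentagon_table.keys():
--         pentagon_count += 1
--     return pentagon_count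
-- ===== SOURCE B (Python) =====
-- def is_bad_cycle(cycle):
--     messages = []
--     for node in cycle:
--         for i in range(2):
--             if node[i] in messages:
--                 return True
--             messages.append(node[i])
--     return False
--
-- def normalize_cycle(cycle):
--     cycle_len = len(cycle)
--     nodes = list(enumerate(cycle))
--     node_val = lambda x: x[1]
--     min_node = min(nodes, key=node_val)[0]
--     normalized = [cycle[(min_node + i) % cycle_len] for i in range(cycle_len)]
--     return tuple(normalized)
--
-- def count_all_pentagons(graph):
--     """Recursive depth-first path extension instead of A's per-node
--     meet-in-the-middle hash join: grow the forward path u->v->w->t by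
--     recursion (no intermediate index), then close the cycle through the
--     incoming side with a direct membership test, collecting the canonical
--     pentagons in a set."""
--     outgoing, incoming = graph
--
--     found = set()
--
--     def extend(path, remaining):
--         if remaining == 0:
--             u = path[0]
--             t = path[-1]
--             for z in incoming[u]:
--                 if t in incoming[z]:
--                     pentagon = path + (z,)
--                     if not is_bad_cycle(pentagon):
--                         found.add(normalize_cycle(pentagon))
--         else:
--             for nxt in outgoing[path[-1]]:
--                 extend(path + (nxt,), remaining - 1)
--
--     for u in outgoing.keys():
--         extend((u,), 3)
--
--     return len(found)
-- ===== Notes on version B (the rewrite author's own statement) =====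
-- stated objective: alternative
-- what changed: B replaces A's per-node meet-in-the-middle hash join (indexing the backward 2-paths by their midpoint and joining a 4-deep forward scan against that index) with a recursive depth-first extension of the forward path u->v->w->t followed by a direct membership test closing the cycle through the incoming side; no intermediate index is built and the canonical pentagons are collected in a set.
import Mathlib
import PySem

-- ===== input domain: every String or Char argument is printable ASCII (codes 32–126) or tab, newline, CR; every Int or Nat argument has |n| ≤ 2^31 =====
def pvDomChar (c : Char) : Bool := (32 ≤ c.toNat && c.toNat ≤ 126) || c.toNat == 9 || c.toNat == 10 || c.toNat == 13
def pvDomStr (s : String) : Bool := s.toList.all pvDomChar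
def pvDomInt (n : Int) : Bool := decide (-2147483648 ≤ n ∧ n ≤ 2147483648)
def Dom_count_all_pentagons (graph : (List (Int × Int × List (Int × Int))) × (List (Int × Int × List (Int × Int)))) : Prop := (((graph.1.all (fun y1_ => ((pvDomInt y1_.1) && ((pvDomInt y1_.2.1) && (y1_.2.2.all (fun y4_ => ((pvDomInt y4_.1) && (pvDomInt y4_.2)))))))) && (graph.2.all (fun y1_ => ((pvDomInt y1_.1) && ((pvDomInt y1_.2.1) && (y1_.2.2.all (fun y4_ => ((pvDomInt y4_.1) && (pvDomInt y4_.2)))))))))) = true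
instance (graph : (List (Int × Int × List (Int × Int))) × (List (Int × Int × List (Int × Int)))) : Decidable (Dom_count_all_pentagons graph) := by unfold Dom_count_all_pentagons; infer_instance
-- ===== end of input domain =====

-- B drops A's per-node meet-in-the-middle hash join and instead grows the forward path u→v→w→t by
-- recursive depth-first extension, closing the cycle through the incoming side with a direct
-- membership test; objective: alternative (no intermediate index, different traversal).

-- ===== PORT A =====
-- the two dicts of the Python argument, flattened by the type convention, viewed as dicts again
def pvToDict (l : List (Int × Int × List (Int × Int))) :
    PySem.Dict (Int × Int) (List (Int × Int)) :=
  PySem.Dict.ofList (l.map (fun e => ((e.1, e.2.1), e.2.2)))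

-- helper is_bad_cycle: the loop over the nodes with the growing `messages` list
def pvBadGo (messages : List Int) : List (Int × Int) → Bool
  | [] => false
  | n :: rest =>
    if messages.contains n.1 then true
    else if (messages ++ [n.1]).contains n.2 then true
    else pvBadGo (messages ++ [n.1, n.2]) rest

def is_bad_cycle (cycle : List (Int × Int)) : Bool := pvBadGo [] cycle

-- helper normalize_cycle; min(nodes, key=node_val) is min with a tuple-valued key = PySem.List.min2?
-- (the `none` branch is Python's ValueError on an empty cycle — both callers pass 5 nodes)
def normalize_cycle (cycle : List (Int × Int)) : List (Int × Int) :=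
  let cycle_len : Int := PySem.List.len cycle
  let nodes := PySem.List.enumerate cycle
  let min_node : Int :=
    match PySem.List.min2? nodes (fun x => x.2.1) (fun x => x.2.2) with
    | some m => m.1
    | none => 0
  (PySem.List.pyRange 0 cycle_len 1).map
    (fun i => PySem.List.pyGetD cycle (PySem.Int.mod (min_node + i) cycle_len) (0, 0))

-- A's per-u `in_path` defaultdict: for z in incoming[u], for t in incoming[z], in_path[t].append(z)
def pvInPath (ig : PySem.Dict (Int × Int) (List (Int × Int))) (u : Int × Int) :
    PySem.Dict (Int × Int) (List (Int × Int)) :=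
  (ig.getD u []).foldl
    (fun d z => (ig.getD z []).foldl (fun d t => d.modify t [] (fun l => l ++ [z])) d)
    PySem.Dict.empty

-- body of A's outer `for u in outgoing.keys()` loop: the 4-deep forward scan against in_path,
-- inserting the normalized pentagons into the bool-valued dict
def pvStepA (og ig : PySem.Dict (Int × Int) (List (Int × Int)))
    (tbl : PySem.Dict (List (Int × Int)) Bool) (u : Int × Int) :
    PySem.Dict (List (Int × Int)) Bool :=
  (og.getD u []).foldl (fun tbl v =>
    (og.getD v []).foldl (fun tbl w =>
      (og.getD w []).foldl (fun tbl t =>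
        ((pvInPath ig u).getD t []).foldl (fun tbl z =>
          if is_bad_cycle [u, v, w, t, z] then tbl
          else tbl.insert (normalize_cycle [u, v, w, t, z]) true) tbl) tbl) tbl) tbl

def count_all_pentagons (graph : (List (Int × Int × List (Int × Int))) × (List (Int × Int × List (Int × Int)))) : Int :=
  let outgoing := pvToDict graph.1
  let incoming := pvToDict graph.2
  let pentagon_table := outgoing.keys.foldl (pvStepA outgoing incoming) PySem.Dict.empty
  pentagon_table.keys.foldl (fun c _ => c + 1) (0 : Int)

-- ===== PORT B =====
-- B's recursive `extend(path, remaining)`: structural recursion on `remaining`; the mutated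
-- closure set `found` becomes an accumulator threaded through and returned
def pvExtend (og ig : PySem.Dict (Int × Int) (List (Int × Int)))
    (found : PySem.Set (List (Int × Int))) (path : List (Int × Int)) :
    Nat → PySem.Set (List (Int × Int))
  | 0 =>
    let u := PySem.List.pyGetD path 0 (0, 0)
    let t := PySem.List.pyGetD path (-1) (0, 0)
    (ig.getD u []).foldl
      (fun s z =>
        if (ig.getD z []).contains t then
          if is_bad_cycle (path ++ [z]) then s
          else PySem.Set.add s (normalize_cycle (path ++ [z]))
        else s)
      found
  | n + 1 =>
    (og.getD (PySem.List.pyGetD path (-1) (0, 0)) []).foldl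
      (fun s nxt => pvExtend og ig s (path ++ [nxt]) n) found

def count_all_pentagons_alt (graph : (List (Int × Int × List (Int × Int))) × (List (Int × Int × List (Int × Int)))) : Int :=
  let outgoing := pvToDict graph.1
  let incoming := pvToDict graph.2
  let found := outgoing.keys.foldl (fun s u => pvExtend outgoing incoming s [u] 3) PySem.Set.empty
  PySem.Set.len found

-- ===== PRECONDITION & SPEC =====
-- exactly the inputs on which every dict lookup A performs hits (otherwise Python A raises
-- KeyError); B's lookups are a subset of A's, so B returns there too
def Pre_count_all_pentagons (graph : (List (Int × Int × List (Int × Int))) × (List (Int × Int × List (Int × Int)))) : Prop :=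
  ∀ u ∈ (pvToDict graph.1).keys,
    (pvToDict graph.2).contains u = true ∧
    (∀ z ∈ (pvToDict graph.2).getD u [], (pvToDict graph.2).contains z = true) ∧
    ∀ v ∈ (pvToDict graph.1).getD u [], (pvToDict graph.1).contains v = true ∧
      ∀ w ∈ (pvToDict graph.1).getD v [], (pvToDict graph.1).contains w = true
instance (graph : (List (Int × Int × List (Int × Int))) × (List (Int × Int × List (Int × Int)))) : Decidable (Pre_count_all_pentagons graph) := by unfold Pre_count_all_pentagons; infer_instance

def pvWitness_count_all_pentagons : ((List (Int × Int × List (Int × Int))) × (List (Int × Int × List (Int × Int)))) :=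
  ([(0, 1, [(2, 3)]), (2, 3, [(4, 5)]), (4, 5, [(6, 7)]), (6, 7, [(8, 9)]), (8, 9, [(0, 1)])],
   [(0, 1, [(8, 9)]), (2, 3, [(0, 1)]), (4, 5, [(2, 3)]), (6, 7, [(4, 5)]), (8, 9, [(6, 7)])])

def Spec_count_all_pentagons (graph : (List (Int × Int × List (Int × Int))) × (List (Int × Int × List (Int × Int)))) (out : Int) : Prop := out = count_all_pentagons_alt graph
instance (graph : (List (Int × Int × List (Int × Int))) × (List (Int × Int × List (Int × Int)))) (out : Int) : Decidable (Spec_count_all_pentagons graph out) := by unfold Spec_count_all_pentagons; infer_instance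

-- ===== CLAIM (what is proved, stated in full; the proofs are below) =====
def Claim_equal_count_all_pentagons : Prop := ∀ (graph : (List (Int × Int × List (Int × Int))) × (List (Int × Int × List (Int × Int)))), Dom_count_all_pentagons graph → Pre_count_all_pentagons graph → Spec_count_all_pentagons graph (count_all_pentagons graph)

-- ===== LEMMAS AND PROOFS =====

lemma pv_foldl_count {α : Type} (l : List α) (n : Int) :
    l.foldl (fun c _ => c + 1) n = n + l.length := by
  induction l generalizing n with
  | nil => simp
  | cons x xs ih => simp [ih]; omega

lemma pv_foldl_inv {γ β : Type} (Inv : γ → Prop) (f : γ → β → γ)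
    (hf : ∀ g b, Inv g → Inv (f g b)) :
    ∀ (l : List β) (g : γ), Inv g → Inv (l.foldl f g) := by
  intro l
  induction l with
  | nil => intro g h; exact h
  | cons b bs ih => intro g h; exact ih _ (hf g b h)

lemma pv_foldl_mem {γ β κ : Type} (M : γ → κ → Prop) (P : β → κ → Prop) (f : γ → β → γ)
    (hf : ∀ g b x, M (f g b) x ↔ M g x ∨ P b x) :
    ∀ (l : List β) (g : γ) (x : κ), M (l.foldl f g) x ↔ M g x ∨ ∃ b ∈ l, P b x := by
  intro l
  induction l with
  | nil => intro g x; simp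
  | cons b bs ih =>
    intro g x
    rw [List.foldl_cons, ih, hf]
    constructor
    · rintro ((h | h) | ⟨b', hb', h⟩)
      · exact .inl h
      · exact .inr ⟨b, by simp, h⟩
      · exact .inr ⟨b', by simp [hb'], h⟩
    · rintro (h | ⟨b', hb', h⟩)
      · exact .inl (.inl h)
      · rcases List.mem_cons.mp hb' with rfl | hb'
        · exact .inl (.inr h)
        · exact .inr ⟨b', hb', h⟩

lemma pv_mem_modify_fold {α : Type} (ts : List (Int × Int)) (a : α)
    (d : PySem.Dict (Int × Int) (List α)) (t : Int × Int) (x : α) :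
    x ∈ (ts.foldl (fun d t' => d.modify t' [] (fun l => l ++ [a])) d).getD t [] ↔
      x ∈ d.getD t [] ∨ (t ∈ ts ∧ x = a) := by
  refine Iff.trans
    (pv_foldl_mem (fun d x => x ∈ PySem.Dict.getD d t []) (fun t' x => t' = t ∧ x = a) _
      (fun d t' x => ?_) ts d x) ?_
  · show x ∈ (d.modify t' [] (fun l => l ++ [a])).getD t [] ↔
      x ∈ d.getD t [] ∨ (t' = t ∧ x = a)
    rw [PySem.Dict.getD_modify]
    by_cases h : t = t'
    · subst h; simp
    · rw [if_neg h]
      constructor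
      · exact fun hx => .inl hx
      · rintro (hx | ⟨he, -⟩)
        · exact hx
        · exact (h he.symm).elim
  · constructor
    · rintro (h | ⟨t', ht', rfl, rfl⟩)
      · exact .inl h
      · exact .inr ⟨ht', rfl⟩
    · rintro (h | ⟨ht, rfl⟩)
      · exact .inl h
      · exact .inr ⟨t, ht, rfl, rfl⟩

lemma pv_mem_in_path (ig : PySem.Dict (Int × Int) (List (Int × Int))) (u t z' : Int × Int) :
    z' ∈ (pvInPath ig u).getD t [] ↔ z' ∈ ig.getD u [] ∧ t ∈ ig.getD z' [] := by
  unfold pvInPath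
  refine Iff.trans
    (pv_foldl_mem (fun d x => x ∈ PySem.Dict.getD d t []) (fun z x => t ∈ ig.getD z [] ∧ x = z) _
      (fun d z x => Iff.trans (pv_mem_modify_fold (ig.getD z []) z d t x) (by tauto)) _ _ z') ?_
  show z' ∈ (PySem.Dict.empty : PySem.Dict (Int × Int) (List (Int × Int))).getD t [] ∨ _ ↔ _
  rw [PySem.Dict.getD_empty]
  constructor
  · rintro (h | ⟨z, hz, ht, rfl⟩)
    · simp at h
    · exact ⟨hz, ht⟩
  · rintro ⟨hz, ht⟩
    exact .inr ⟨z', hz, ht, rfl⟩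

-- the condition under which the pentagon (u,v,w,t,z) is recorded — common to both programs
def pvGood (og ig : PySem.Dict (Int × Int) (List (Int × Int))) (u v w t z : Int × Int) : Prop :=
  v ∈ og.getD u [] ∧ w ∈ og.getD v [] ∧ t ∈ og.getD w [] ∧
    z ∈ ig.getD u [] ∧ t ∈ ig.getD z [] ∧ is_bad_cycle [u, v, w, t, z] = false

lemma pv_stepA_good (og ig : PySem.Dict (Int × Int) (List (Int × Int)))
    (tbl : PySem.Dict (List (Int × Int)) Bool) (u : Int × Int) (x : List (Int × Int)) :
    x ∈ (pvStepA og ig tbl u).keys ↔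
      x ∈ tbl.keys ∨
        ∃ v w t z, pvGood og ig u v w t z ∧ x = normalize_cycle [u, v, w, t, z] := by
  unfold pvStepA
  refine Iff.trans
    (pv_foldl_mem (fun (tbl : PySem.Dict (List (Int × Int)) Bool) x => x ∈ tbl.keys)
      (fun v x => ∃ w ∈ og.getD v [], ∃ t ∈ og.getD w [], ∃ z ∈ (pvInPath ig u).getD t [],
        is_bad_cycle [u, v, w, t, z] = false ∧ x = normalize_cycle [u, v, w, t, z]) _
      (fun tbl v x =>
        pv_foldl_mem (fun (tbl : PySem.Dict (List (Int × Int)) Bool) x => x ∈ tbl.keys)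
          (fun w x => ∃ t ∈ og.getD w [], ∃ z ∈ (pvInPath ig u).getD t [],
            is_bad_cycle [u, v, w, t, z] = false ∧ x = normalize_cycle [u, v, w, t, z]) _
          (fun tbl w x =>
            pv_foldl_mem (fun (tbl : PySem.Dict (List (Int × Int)) Bool) x => x ∈ tbl.keys)
              (fun t x => ∃ z ∈ (pvInPath ig u).getD t [],
                is_bad_cycle [u, v, w, t, z] = false ∧ x = normalize_cycle [u, v, w, t, z]) _
              (fun tbl t x =>
                pv_foldl_mem (fun (tbl : PySem.Dict (List (Int × Int)) Bool) x => x ∈ tbl.keys)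
                  (fun z x => is_bad_cycle [u, v, w, t, z] = false ∧
                    x = normalize_cycle [u, v, w, t, z]) _
                  (fun tbl z x => ?_) _ tbl x) _ tbl x) _ tbl x) _ tbl x) ?_
  · show x ∈ (if is_bad_cycle [u, v, w, t, z] then tbl
        else tbl.insert (normalize_cycle [u, v, w, t, z]) true).keys ↔ _
    by_cases hb : is_bad_cycle [u, v, w, t, z] = true
    · simp [hb]
    · simp only [Bool.not_eq_true] at hb
      rw [if_neg (by simp [hb]), PySem.Dict.mem_keys_insert]
      constructor
      · rintro (rfl | h)
        · exact .inr ⟨hb, rfl⟩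
        · exact .inl h
      · rintro (h | ⟨-, rfl⟩)
        · exact .inr h
        · exact .inl rfl
  · constructor
    · rintro (h | ⟨v, hv, w, hw, t, ht, z, hz, hb, rfl⟩)
      · exact .inl h
      · have hz' := (pv_mem_in_path ig u t z).mp hz
        exact .inr ⟨v, w, t, z, ⟨hv, hw, ht, hz'.1, hz'.2, hb⟩, rfl⟩
    · rintro (h | ⟨v, w, t, z, ⟨hv, hw, ht, hzu, htz, hb⟩, rfl⟩)
      · exact .inl h
      · exact .inr ⟨v, hv, w, hw, t, ht, z, (pv_mem_in_path ig u t z).mpr ⟨hzu, htz⟩, hb, rfl⟩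

-- fuel-0 body of B's extend: the z-loop closing the path [u,v,w,t]
lemma pv_extend0_mem (og ig : PySem.Dict (Int × Int) (List (Int × Int)))
    (s : PySem.Set (List (Int × Int))) (u v w t : Int × Int) (x : List (Int × Int)) :
    x ∈ pvExtend og ig s [u, v, w, t] 0 ↔
      x ∈ s ∨ ∃ z ∈ ig.getD u [], t ∈ ig.getD z [] ∧
        is_bad_cycle [u, v, w, t, z] = false ∧ x = normalize_cycle [u, v, w, t, z] := by
  show x ∈ ((ig.getD (PySem.List.pyGetD [u, v, w, t] 0 (0, 0)) []).foldl _ s) ↔ _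
  have h0 : PySem.List.pyGetD [u, v, w, t] 0 (0, 0) = u := by
    simp [PySem.List.pyGetD, PySem.List.pyGet?, PySem.List.pyIdx?]
  have h1 : PySem.List.pyGetD [u, v, w, t] (-1) (0, 0) = t := by
    simp [PySem.List.pyGetD, PySem.List.pyGet?, PySem.List.pyIdx?]
  rw [h0]
  refine Iff.trans
    (pv_foldl_mem (fun (s : PySem.Set (List (Int × Int))) x => x ∈ s)
      (fun z x => t ∈ ig.getD z [] ∧ is_bad_cycle [u, v, w, t, z] = false ∧
        x = normalize_cycle [u, v, w, t, z]) _
      (fun s z x => ?_) _ s x) (by tauto)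
  rw [h1]
  by_cases hc : (ig.getD z []).contains t = true
  · rw [if_pos hc]
    have hct : t ∈ ig.getD z [] := by
      simpa using hc
    by_cases hb : is_bad_cycle ([u, v, w] ++ [t] ++ [z]) = true
    · simp only [List.cons_append, List.nil_append] at hb ⊢
      rw [if_pos hb]
      simp only [hb]
      constructor
      · exact fun h => .inl h
      · rintro (h | ⟨-, hb', -⟩)
        · exact h
        · simp at hb'
    · simp only [Bool.not_eq_true] at hb
      simp only [List.cons_append, List.nil_append] at hb ⊢
      rw [if_neg (by simp [hb]), PySem.Set.mem_add]
      constructor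
      · rintro (h | rfl)
        · exact .inl h
        · exact .inr ⟨hct, hb, rfl⟩
      · rintro (h | ⟨-, -, rfl⟩)
        · exact .inl h
        · exact .inr rfl
  · rw [if_neg hc]
    constructor
    · exact fun h => .inl h
    · rintro (h | ⟨hct, -, -⟩)
      · exact h
      · exact absurd hc (by simp [hct])

-- B's extend started at [u] with remaining = 3 collects exactly the good pentagons at u
lemma pv_extend_mem (og ig : PySem.Dict (Int × Int) (List (Int × Int)))
    (s : PySem.Set (List (Int × Int))) (u : Int × Int) (x : List (Int × Int)) :
    x ∈ pvExtend og ig s [u] 3 ↔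
      x ∈ s ∨ ∃ v w t z, pvGood og ig u v w t z ∧ x = normalize_cycle [u, v, w, t, z] := by
  have hgu : PySem.List.pyGetD [u] (-1) (0, 0) = u := by
    simp [PySem.List.pyGetD, PySem.List.pyGet?, PySem.List.pyIdx?]
  show x ∈ ((og.getD (PySem.List.pyGetD [u] (-1) (0, 0)) []).foldl _ s) ↔ _
  rw [hgu]
  refine Iff.trans
    (pv_foldl_mem (fun (s : PySem.Set (List (Int × Int))) x => x ∈ s)
      (fun v x => ∃ w ∈ og.getD v [], ∃ t ∈ og.getD w [], ∃ z ∈ ig.getD u [],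
        t ∈ ig.getD z [] ∧ is_bad_cycle [u, v, w, t, z] = false ∧
          x = normalize_cycle [u, v, w, t, z]) _
      (fun s v x => ?_) _ s x) ?_
  · have hgv : PySem.List.pyGetD [u, v] (-1) (0, 0) = v := by
      simp [PySem.List.pyGetD, PySem.List.pyGet?, PySem.List.pyIdx?]
    show x ∈ ((og.getD (PySem.List.pyGetD ([u] ++ [v]) (-1) (0, 0)) []).foldl _ s) ↔ _
    simp only [List.cons_append, List.nil_append]
    rw [hgv]
    refine pv_foldl_mem (fun (s : PySem.Set (List (Int × Int))) x => x ∈ s)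
      (fun w x => ∃ t ∈ og.getD w [], ∃ z ∈ ig.getD u [],
        t ∈ ig.getD z [] ∧ is_bad_cycle [u, v, w, t, z] = false ∧
          x = normalize_cycle [u, v, w, t, z]) _
      (fun s w x => ?_) _ s x
    have hgw : PySem.List.pyGetD [u, v, w] (-1) (0, 0) = w := by
      simp [PySem.List.pyGetD, PySem.List.pyGet?, PySem.List.pyIdx?]
    show x ∈ ((og.getD (PySem.List.pyGetD ([u, v] ++ [w]) (-1) (0, 0)) []).foldl _ s) ↔ _
    simp only [List.cons_append, List.nil_append]
    rw [hgw]
    refine pv_foldl_mem (fun (s : PySem.Set (List (Int × Int))) x => x ∈ s)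
      (fun t x => ∃ z ∈ ig.getD u [],
        t ∈ ig.getD z [] ∧ is_bad_cycle [u, v, w, t, z] = false ∧
          x = normalize_cycle [u, v, w, t, z]) _
      (fun s t x => ?_) _ s x
    show x ∈ pvExtend og ig s ([u, v, w] ++ [t]) 0 ↔ _
    simp only [List.cons_append, List.nil_append]
    exact pv_extend0_mem og ig s u v w t x
  · unfold pvGood
    constructor
    · rintro (h | ⟨v, hv, w, hw, t, ht, z, hz, htz, hb, rfl⟩)
      · exact .inl h
      · exact .inr ⟨v, w, t, z, ⟨hv, hw, ht, hz, htz, hb⟩, rfl⟩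
    · rintro (h | ⟨v, w, t, z, ⟨hv, hw, ht, hz, htz, hb⟩, rfl⟩)
      · exact .inl h
      · exact .inr ⟨v, hv, w, hw, t, ht, z, hz, htz, hb, rfl⟩

lemma pv_nodup_stepA (og ig : PySem.Dict (Int × Int) (List (Int × Int)))
    (tbl : PySem.Dict (List (Int × Int)) Bool) (u : Int × Int)
    (h : tbl.keys.Nodup) : (pvStepA og ig tbl u).keys.Nodup := by
  unfold pvStepA
  refine pv_foldl_inv (fun (tbl : PySem.Dict (List (Int × Int)) Bool) => tbl.keys.Nodup) _
    (fun tbl v h => ?_) _ _ h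
  refine pv_foldl_inv (fun (tbl : PySem.Dict (List (Int × Int)) Bool) => tbl.keys.Nodup) _
    (fun tbl w h => ?_) _ _ h
  refine pv_foldl_inv (fun (tbl : PySem.Dict (List (Int × Int)) Bool) => tbl.keys.Nodup) _
    (fun tbl t h => ?_) _ _ h
  refine pv_foldl_inv (fun (tbl : PySem.Dict (List (Int × Int)) Bool) => tbl.keys.Nodup) _
    (fun tbl z h => ?_) _ _ h
  split
  · exact h
  · exact PySem.Dict.nodup_keys_insert _ _ _ h

lemma pv_nodup_extend (og ig : PySem.Dict (Int × Int) (List (Int × Int))) :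
    ∀ (n : Nat) (path : List (Int × Int)) (s : PySem.Set (List (Int × Int))),
      s.Nodup → (pvExtend og ig s path n).Nodup := by
  intro n
  induction n with
  | zero =>
    intro path s h
    refine pv_foldl_inv (fun (s : PySem.Set (List (Int × Int))) => s.Nodup) _
      (fun s z h => ?_) _ _ h
    split
    · split
      · exact h
      · exact PySem.Set.nodup_add _ _ h
    · exact h
  | succ n ih =>
    intro path s h
    exact pv_foldl_inv (fun (s : PySem.Set (List (Int × Int))) => s.Nodup) _
      (fun s nxt h => ih _ _ h) _ _ h

-- ===== VERDICT (by name: the statement is the Claim_ definition above) =====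
theorem count_all_pentagons_spec : Claim_equal_count_all_pentagons := by
  intro graph _ _
  show count_all_pentagons graph = count_all_pentagons_alt graph
  unfold count_all_pentagons count_all_pentagons_alt
  simp only []
  rw [pv_foldl_count]
  have hA := pv_foldl_mem
    (fun (tbl : PySem.Dict (List (Int × Int)) Bool) x => x ∈ tbl.keys)
    (fun u x => ∃ v w t z, pvGood (pvToDict graph.1) (pvToDict graph.2) u v w t z ∧
      x = normalize_cycle [u, v, w, t, z])
    (pvStepA (pvToDict graph.1) (pvToDict graph.2))
    (fun tbl u x => pv_stepA_good _ _ tbl u x)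
    (pvToDict graph.1).keys PySem.Dict.empty
  have hB := pv_foldl_mem
    (fun (s : PySem.Set (List (Int × Int))) x => x ∈ s)
    (fun u x => ∃ v w t z, pvGood (pvToDict graph.1) (pvToDict graph.2) u v w t z ∧
      x = normalize_cycle [u, v, w, t, z])
    (fun s u => pvExtend (pvToDict graph.1) (pvToDict graph.2) s [u] 3)
    (fun s u x => pv_extend_mem _ _ s u x)
    (pvToDict graph.1).keys PySem.Set.empty
  have hndA : ((pvToDict graph.1).keys.foldl
      (pvStepA (pvToDict graph.1) (pvToDict graph.2)) PySem.Dict.empty).keys.Nodup :=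
    pv_foldl_inv (fun (tbl : PySem.Dict (List (Int × Int)) Bool) => tbl.keys.Nodup) _
      (fun tbl u h => pv_nodup_stepA _ _ tbl u h) _ _ PySem.Dict.nodup_keys_empty
  have hndB : ((pvToDict graph.1).keys.foldl
      (fun s u => pvExtend (pvToDict graph.1) (pvToDict graph.2) s [u] 3) PySem.Set.empty).Nodup :=
    pv_foldl_inv (fun (s : PySem.Set (List (Int × Int))) => s.Nodup) _
      (fun s u h => pv_nodup_extend _ _ 3 [u] s h) _ _ List.nodup_nil
  have hperm : ((pvToDict graph.1).keys.foldl
        (pvStepA (pvToDict graph.1) (pvToDict graph.2)) PySem.Dict.empty).keys.Perm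
      ((pvToDict graph.1).keys.foldl
        (fun s u => pvExtend (pvToDict graph.1) (pvToDict graph.2) s [u] 3) PySem.Set.empty) := by
    rw [List.perm_ext_iff_of_nodup hndA hndB]
    intro x
    refine Iff.trans (hA x) (Iff.trans ?_ (hB x).symm)
    rw [PySem.Dict.keys_empty]
    show x ∈ ([] : List (List (Int × Int))) ∨ _ ↔ x ∈ (PySem.Set.empty : PySem.Set (List (Int × Int))) ∨ _
    rfl
  have hlen := hperm.length_eq
  show (0 : Int) + _ = PySem.Set.len _
  simp only [PySem.Set.len]
  rw [hlen]
  simp only [zero_add]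

theorem pv_witness_ok :
    Dom_count_all_pentagons pvWitness_count_all_pentagons ∧
      Pre_count_all_pentagons pvWitness_count_all_pentagons := by decide
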